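-- pv_equiv track=rewrite | github.com/WindFrank/QuantumDataAndProgram | RandomCircuit/CirqSimulateEnvironment.py | get_qubit_vector_index
-- ===== SOURCE A (Python) =====
-- import math
--
-- def get_qubit_vector_index(vector_number):
--     result = []
--     num_qubit = int(math.log2(vector_number))
--     for i in range(0, vector_number):
--         bin_temp_number_list = list(bin(i))
--         bin_temp_number_list.reverse()
--         index_sub_result = ''
--         for j in range(num_qubit):
--             if bin_temp_number_list[j] != 'b':
--                 index_sub_result = bin_temp_number_list[j] + index_sub_result
--             else:
--                 break
--         while len(index_sub_result) < num_qubit: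
--             index_sub_result = '0' + index_sub_result
--         result.append(index_sub_result)
--     return result
-- ===== SOURCE B (Python) =====
-- import math
--
-- def get_qubit_vector_index(vector_number):
--     num_qubit = int(math.log2(vector_number))
--     table = ['']
--     for _ in range(num_qubit):
--         table = ['0' + s for s in table] + ['1' + s for s in table]
--     period = len(table)
--     return [table[i % period] for i in range(vector_number)]
-- ===== Notes on version B (the rewrite author's own statement) =====
-- stated objective: faster
-- what changed: Replaces A's per-element bin()-string reversal, indexed break loop and zero-padding by a table of all num_qubit-bit strings built once by bit prepending, then a single pass returning the table entry at index i mod table length.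
import Mathlib
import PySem

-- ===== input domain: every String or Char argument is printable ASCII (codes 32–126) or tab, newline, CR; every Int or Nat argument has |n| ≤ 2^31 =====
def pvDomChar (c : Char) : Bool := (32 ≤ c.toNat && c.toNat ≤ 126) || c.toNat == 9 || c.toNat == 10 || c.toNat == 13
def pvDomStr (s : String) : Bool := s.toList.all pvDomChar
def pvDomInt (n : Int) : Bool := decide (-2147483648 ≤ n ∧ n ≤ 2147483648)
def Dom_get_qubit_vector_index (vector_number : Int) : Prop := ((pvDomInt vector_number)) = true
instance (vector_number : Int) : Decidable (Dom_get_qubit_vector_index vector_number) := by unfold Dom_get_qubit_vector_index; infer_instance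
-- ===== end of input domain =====

-- B replaces A's per-element bin()-reverse/slice/pad work by a table of all num_qubit-bit
-- strings built once, indexed cyclically (constant-factor speedup, measured).

-- ===== PORT A =====

-- '0' or '1' depending on the parity of n (the character bin() prints for the bit n % 2)
def pvBitChar (n : Nat) : Char := if n % 2 = 1 then '1' else '0'

-- LSB-first binary digits of n, no leading zeros (empty for 0); bin(n) is built from these
def pvDRev : Nat → List Char
  | 0 => []
  | n+1 => pvBitChar (n+1) :: pvDRev ((n+1) / 2)
decreasing_by exact Nat.div_lt_self (Nat.succ_pos n) (by omega)

-- list(bin(i)) for i ≥ 0: exact — '0','b' then the binary digits MSB-first ('0' for i = 0)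
def pvBinList (n : Nat) : List Char :=
  '0' :: 'b' :: (if n = 0 then ['0'] else (pvDRev n).reverse)

-- inner 'for j in range(num_qubit)' loop with its break, walking the reversed list by index;
-- the nil/succ case is Python's IndexError, unreachable on bin-lists (the 'b' breaks first)
def pvLoopA : List Char → Nat → List Char → List Char
  | _, 0, acc => acc
  | [], _+1, acc => acc
  | c :: rest, k+1, acc => if c ≠ 'b' then pvLoopA rest k (c :: acc) else acc

-- 'while len(index_sub_result) < num_qubit: index_sub_result = '0' + index_sub_result'
def pvPad (k : Nat) (s : List Char) : List Char :=
  if s.length < k then pvPad k ('0' :: s) else s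
termination_by k - s.length
decreasing_by simp; omega

-- int(math.log2(vector_number)) = Nat.log2: exact on Pre_ (1 ≤ v ≤ 2^31, no float rounding)
def get_qubit_vector_index (vector_number : Int) : List String :=
  let num_qubit := Nat.log2 vector_number.toNat
  (PySem.List.pyRange 0 vector_number 1).foldl
    (fun result i =>
      let bin_temp_number_list := (pvBinList i.toNat).reverse
      let index_sub_result := pvLoopA bin_temp_number_list num_qubit []
      result ++ [String.ofList (pvPad num_qubit index_sub_result)])
    []

-- ===== PORT B =====

-- table = ['0'+s for s in table] + ['1'+s for s in table], strings as char lists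
def pvTabStep (t : List (List Char)) : List (List Char) :=
  t.map (fun s => '0' :: s) ++ t.map (fun s => '1' :: s)

def get_qubit_vector_index_alt (vector_number : Int) : List String :=
  let num_qubit := Nat.log2 vector_number.toNat
  let table := (List.range num_qubit).foldl (fun t _ => pvTabStep t) [([] : List Char)]
  let period := table.length
  (PySem.List.pyRange 0 vector_number 1).map
    (fun i => String.ofList (PySem.List.pyGetD table (PySem.Int.mod i period) []))

-- ===== PRECONDITION & SPEC =====
-- Pre_ excludes exactly vector_number ≤ 0, where math.log2 raises ValueError in both A and B.
def Pre_get_qubit_vector_index (vector_number : Int) : Prop := 1 ≤ vector_number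
instance (vector_number : Int) : Decidable (Pre_get_qubit_vector_index vector_number) := by unfold Pre_get_qubit_vector_index; infer_instance
def pvWitness_get_qubit_vector_index : Int := 5

def Spec_get_qubit_vector_index (vector_number : Int) (out : List String) : Prop := out = get_qubit_vector_index_alt vector_number
instance (vector_number : Int) (out : List String) : Decidable (Spec_get_qubit_vector_index vector_number out) := by unfold Spec_get_qubit_vector_index; infer_instance

-- ===== CLAIM (what is proved, stated in full; the proofs are below) =====
def Claim_equal_get_qubit_vector_index : Prop := ∀ (vector_number : Int), Dom_get_qubit_vector_index vector_number → Pre_get_qubit_vector_index vector_number → Spec_get_qubit_vector_index vector_number (get_qubit_vector_index vector_number)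

-- ===== LEMMAS AND PROOFS =====

-- MSB-first k-bit string of m (mod 2^k), the common value both per-element computations reach
def pvBits : Nat → Nat → List Char
  | 0, _ => []
  | k+1, m => pvBitChar (m / 2^k) :: pvBits k (m % 2^k)

-- LSB-first k low bits of n
def pvLows : Nat → Nat → List Char
  | 0, _ => []
  | k+1, n => pvBitChar n :: pvLows k (n / 2)

-- the table after k iterations
def pvTab : Nat → List (List Char)
  | 0 => [[]]
  | k+1 => pvTabStep (pvTab k)

theorem pvBitChar_mod (n : Nat) : pvBitChar (n % 2) = pvBitChar n := by
  have h : n % 2 % 2 = n % 2 := Nat.mod_mod_of_dvd n dvd_rfl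
  simp [pvBitChar, h]

theorem pvBits_snoc (k m : Nat) : pvBits (k+1) m = pvBits k (m / 2) ++ [pvBitChar m] := by
  induction k generalizing m with
  | zero => simp [pvBits]
  | succ k ih =>
    show pvBitChar (m / 2^(k+1)) :: pvBits (k+1) (m % 2^(k+1)) = _
    rw [ih (m % 2^(k+1))]
    show _ = pvBitChar (m / 2 / 2^k) :: pvBits k (m / 2 % 2^k) ++ [pvBitChar m]
    have h1 : m % 2^(k+1) / 2 = m / 2 % 2^k := by
      have := Nat.mod_mul_right_div_self m 2 (2^k)
      rw [show 2 * 2^k = 2^(k+1) by ring] at this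
      omega
    have h2 : m / 2 / 2^k = m / 2^(k+1) := by
      rw [Nat.div_div_eq_div_mul]; congr 1; ring
    have h3 : pvBitChar (m % 2^(k+1)) = pvBitChar m := by
      rw [← pvBitChar_mod (m % 2^(k+1)), Nat.mod_mod_of_dvd _ ⟨2^k, by ring⟩, pvBitChar_mod]
    rw [h1, h2, h3]; simp

theorem pvLows_reverse (k n : Nat) : (pvLows k n).reverse = pvBits k n := by
  induction k generalizing n with
  | zero => simp [pvLows, pvBits]
  | succ k ih =>
    show (pvBitChar n :: pvLows k (n / 2)).reverse = _
    rw [List.reverse_cons, ih, ← pvBits_snoc]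

theorem pvBits_mod (k m : Nat) : pvBits k (m % 2^k) = pvBits k m := by
  cases k with
  | zero => simp [pvBits]
  | succ k =>
    show pvBitChar (m % 2^(k+1) / 2^k) :: pvBits k (m % 2^(k+1) % 2^k)
       = pvBitChar (m / 2^k) :: pvBits k (m % 2^k)
    have h1 : m % 2^(k+1) / 2^k = m / 2^k % 2 := by
      have := Nat.mod_mul_right_div_self m (2^k) 2
      rw [show 2^k * 2 = 2^(k+1) by ring] at this
      omega
    have h2 : m % 2^(k+1) % 2^k = m % 2^k := by
      exact Nat.mod_mod_of_dvd _ ⟨2, by ring⟩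
    rw [h1, h2, pvBitChar_mod]

theorem pvTab_length (k : Nat) : (pvTab k).length = 2^k := by
  induction k with
  | zero => rfl
  | succ k ih => simp [pvTab, pvTabStep, ih]; ring

theorem pvTab_getElem? (k m : Nat) (h : m < 2^k) :
    (pvTab k)[m]? = some (pvBits k m) := by
  induction k generalizing m with
  | zero => interval_cases m; rfl
  | succ k ih =>
    show (pvTabStep (pvTab k))[m]? = _
    unfold pvTabStep
    by_cases hm : m < 2^k
    · rw [List.getElem?_append_left (by simp [pvTab_length]; omega)]
      rw [List.getElem?_map, ih m hm]
      have hd : m / 2^k = 0 := Nat.div_eq_of_lt hm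
      have hmod : m % 2^k = m := Nat.mod_eq_of_lt hm
      simp [pvBits, hd, hmod, pvBitChar]
    · rw [List.getElem?_append_right (by simp [pvTab_length]; omega)]
      rw [List.getElem?_map]
      simp only [List.length_map, pvTab_length]
      rw [ih (m - 2^k) (by omega)]
      have hd : m / 2^k = 1 := by
        rw [show m = (m - 2^k) + 2^k by omega,
          Nat.add_div_right _ (Nat.two_pow_pos k),
          Nat.div_eq_of_lt (by omega)]
      have hmod : m % 2^k = m - 2^k := by
        rw [Nat.mod_eq_sub_mod (by omega), Nat.mod_eq_of_lt (by omega)]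
      simp [pvBits, hd, hmod, pvBitChar]

theorem pvTab_foldl (k : Nat) :
    (List.range k).foldl (fun t _ => pvTabStep t) [([] : List Char)] = pvTab k := by
  induction k with
  | zero => rfl
  | succ k ih => rw [List.range_succ, List.foldl_append, ih]; rfl

-- A-side lemmas

theorem pvDRev_ne_b (n : Nat) : ∀ c ∈ pvDRev n, c ≠ 'b' := by
  fun_induction pvDRev with
  | case1 => simp
  | case2 n ih =>
    intro c hc
    rcases List.mem_cons.mp hc with h | h
    · subst h; unfold pvBitChar; split <;> decide
    · exact ih c h

theorem pvLoopA_break (d : List Char) (hd : ∀ c ∈ d, c ≠ 'b') :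
    ∀ (k : Nat) (acc : List Char),
    pvLoopA (d ++ ['b', '0']) k acc = (d.take k).reverse ++ acc := by
  induction d with
  | nil =>
    intro k acc; cases k with
    | zero => rfl
    | succ k => simp [pvLoopA]
  | cons c rest ih =>
    intro k acc; cases k with
    | zero => rfl
    | succ k =>
      have hc : c ≠ 'b' := hd c (by simp)
      have hstep : pvLoopA ((c :: rest) ++ ['b','0']) (k+1) acc
          = pvLoopA (rest ++ ['b','0']) k (c :: acc) := by
        simp [pvLoopA, hc]
      rw [hstep, ih (fun x hx => hd x (by simp [hx])) k (c :: acc)]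
      simp

theorem pvPad_eq (k : Nat) (s : List Char) :
    pvPad k s = List.replicate (k - s.length) '0' ++ s := by
  fun_induction pvPad with
  | case1 s hlen ih =>
    rw [ih]
    have h1 : k - s.length = (k - ('0'::s).length) + 1 := by simp; omega
    rw [h1, List.replicate_succ']
    simp
  | case2 s hlen =>
    have h1 : k - s.length = 0 := by omega
    simp [h1]

theorem pvLows_zero (k : Nat) : pvLows k 0 = List.replicate k '0' := by
  induction k with
  | zero => rfl
  | succ k ih => show pvBitChar 0 :: pvLows k 0 = _; rw [ih]; rfl

theorem pvLows_pos (k n : Nat) (hn : 0 < n) :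
    pvLows k n = (pvDRev n).take k ++ List.replicate (k - (pvDRev n).length) '0' := by
  induction k generalizing n with
  | zero => simp [pvLows]
  | succ k ih =>
    obtain ⟨m, rfl⟩ : ∃ m, n = m + 1 := ⟨n - 1, by omega⟩
    show pvBitChar (m+1) :: pvLows k ((m+1)/2) = _
    rw [show pvDRev (m+1) = pvBitChar (m+1) :: pvDRev ((m+1)/2) from by rw [pvDRev]]
    simp only [List.take_succ_cons, List.length_cons]
    by_cases h2 : (m+1)/2 = 0
    · obtain ⟨rfl⟩ : m = 0 := by omega
      simp [pvDRev, pvLows_zero]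
    · rw [ih _ (by omega)]
      simp [Nat.succ_sub_succ]

theorem pvLows_take_pad (k n : Nat) :
    pvLows k n =
      (if n = 0 then ['0'] else pvDRev n).take k
        ++ List.replicate (k - (if n = 0 then ['0'] else pvDRev n).length) '0' := by
  by_cases hn : n = 0
  · subst hn; simp [pvLows_zero]
    cases k with
    | zero => simp
    | succ k => simp [List.replicate_succ]
  · simp only [hn, if_false]
    exact pvLows_pos k n (by omega)

-- per-element equality: A's loop+pad on bin(n) produces the k-bit string pvBits k n
theorem pvElemA (k n : Nat) :
    pvPad k (pvLoopA ((pvBinList n).reverse) k []) = pvBits k n := by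
  have hrev : (pvBinList n).reverse
      = (if n = 0 then ['0'] else pvDRev n) ++ ['b', '0'] := by
    unfold pvBinList
    by_cases hn : n = 0 <;> simp [hn]
  set d := (if n = 0 then ['0'] else pvDRev n) with hd
  have hnb : ∀ c ∈ d, c ≠ 'b' := by
    intro c hc
    by_cases hn : n = 0
    · simp [hd, hn] at hc; subst hc; decide
    · exact pvDRev_ne_b n c (by simpa [hd, hn] using hc)
  rw [hrev, pvLoopA_break d hnb k [], List.append_nil, pvPad_eq, ← pvLows_reverse]
  rw [pvLows_take_pad k n, ← hd]
  rw [List.reverse_append, List.reverse_replicate, List.length_reverse, List.length_take]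
  congr 2
  omega

-- ===== VERDICT (by name: the statement is the Claim_ definition above) =====
theorem get_qubit_vector_index_spec : Claim_equal_get_qubit_vector_index := by
  intro v _ _
  unfold Spec_get_qubit_vector_index get_qubit_vector_index get_qubit_vector_index_alt
  simp only [pvTab_foldl, pvTab_length]
  rw [PySem.List.foldl_append_singleton_eq_map]
  apply List.map_congr_left
  intro i hi
  have h0 : 0 ≤ i := (PySem.List.mem_pyRange_one.mp hi).1
  set k := Nat.log2 v.toNat
  have hm : PySem.Int.mod i (((2^k : Nat) : Int))
      = ((i.toNat % 2^k : Nat) : Int) := by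
    rw [show i = ((i.toNat : Nat) : Int) by omega]
    exact_mod_cast PySem.Int.mod_natCast i.toNat (2^k)
  rw [pvElemA k i.toNat, hm, PySem.List.pyGetD_natCast]
  have hlt : i.toNat % 2^k < 2^k := Nat.mod_lt _ (Nat.two_pow_pos k)
  rw [List.getD_eq_getElem?_getD, pvTab_getElem? k _ (by simpa [pvTab_length] using hlt)]
  rw [pvBits_mod]
  rfl
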